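-- pv_equiv track=rewrite | github.com/TinyWizard3D/Renamer | renameFunctions.py | handleDecor
-- ===== SOURCE A (Python) =====
-- def handleDecor(objName, settings):
-- 	decorators = {
-- 		"defaultState": lambda x: x,
-- 		"uppercaseState": str.upper,
-- 		"lowercaseState": str.lower,
-- 		"capitalizeState": str.capitalize
-- 	}
--
-- 	for state, func in decorators.items():
-- 		if settings.get(state):
-- 			return func(str(objName))
--
-- 	return objName
-- ===== SOURCE B (Python) =====
-- def handleDecor(objName, settings):
-- 	PRIORITY = {"defaultState": 0, "uppercaseState": 1, "lowercaseState": 2, "capitalizeState": 3}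
-- 	best = 4
-- 	for key, enabled in settings.items():
-- 		p = PRIORITY.get(key, 4)
-- 		if enabled and p < best:
-- 			best = p
-- 	s = str(objName)
-- 	return (s, s.upper(), s.lower(), s.capitalize(), objName)[best]
-- ===== Notes on version B (the rewrite author's own statement) =====
-- stated objective: alternative
-- what changed: Instead of scanning the decorator table and probing settings.get per state with an early return, B makes one pass over the settings items accumulating the minimum priority of any enabled known flag, then selects the transform by that index from a precomputed tuple; Pre_ only excludes association lists with duplicate keys, which a Python dict cannot contain.
import Mathlib
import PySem

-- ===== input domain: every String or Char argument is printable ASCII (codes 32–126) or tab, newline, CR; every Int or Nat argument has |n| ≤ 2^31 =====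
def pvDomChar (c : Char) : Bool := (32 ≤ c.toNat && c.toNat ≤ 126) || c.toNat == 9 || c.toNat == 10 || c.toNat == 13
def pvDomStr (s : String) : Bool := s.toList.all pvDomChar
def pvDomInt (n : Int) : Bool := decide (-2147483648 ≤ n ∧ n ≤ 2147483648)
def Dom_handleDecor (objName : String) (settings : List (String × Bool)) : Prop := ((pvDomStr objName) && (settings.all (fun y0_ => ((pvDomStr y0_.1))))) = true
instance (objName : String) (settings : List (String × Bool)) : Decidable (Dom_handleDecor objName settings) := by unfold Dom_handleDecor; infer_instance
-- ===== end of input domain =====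

-- ===== PORT A =====
-- B replaces A's decorator-table scan + settings.get per state by one fold over the
-- settings items computing the minimum enabled priority (objective: alternative); return values only.
-- str.capitalize hand-port (exact on the ASCII domain): first char uppercased, rest lowercased
def pyCapitalize (s : String) : String :=
  match s.toList with
  | [] => s
  | c :: cs => String.ofList (PySem.Chars.upperChar c :: PySem.Chars.lower cs)

-- settings.get(state) on the dict `settings`: first match in the association list, None (falsy) if absent
def pyGetBool (settings : List (String × Bool)) (k : String) : Bool :=
  match settings.find? (fun p => p.1 == k) with
  | some p => p.2
  | none => false

-- the 'for state, func in decorators.items(): if settings.get(state): return func(str(objName))' loop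
def handleDecorLoop (objName : String) (settings : List (String × Bool)) :
    List (String × (String → String)) → String
  | [] => objName
  | (state, func) :: rest =>
      if pyGetBool settings state then func objName
      else handleDecorLoop objName settings rest

def handleDecor (objName : String) (settings : List (String × Bool)) : String :=
  handleDecorLoop objName settings
    [("defaultState", fun x => x),
     ("uppercaseState", PySem.Str.upper),
     ("lowercaseState", PySem.Str.lower),
     ("capitalizeState", pyCapitalize)]

-- ===== PORT B =====
-- PRIORITY.get(key, 4)
def prioB (k : String) : Nat :=
  if k = "defaultState" then 0
  else if k = "uppercaseState" then 1
  else if k = "lowercaseState" then 2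
  else if k = "capitalizeState" then 3
  else 4

-- the 'for key, enabled in settings.items(): p = PRIORITY.get(key, 4); if enabled and p < best: best = p' loop
def stepB (best : Nat) (kv : String × Bool) : Nat :=
  if kv.2 = true ∧ prioB kv.1 < best then prioB kv.1 else best

def handleDecor_alt (objName : String) (settings : List (String × Bool)) : String :=
  let best := settings.foldl stepB 4
  let s := objName  -- str(objName) is the identity on a string
  -- (s, s.upper(), s.lower(), s.capitalize(), objName)[best]
  match best with
  | 0 => s
  | 1 => PySem.Str.upper s
  | 2 => PySem.Str.lower s
  | 3 => pyCapitalize s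
  | _ => objName

-- ===== PRECONDITION & SPEC =====
-- Pre_ excludes association lists with duplicate keys: a Python dict `settings` cannot contain
-- them, and on such lists the first-match reading of the encoding is accidental.
def Pre_handleDecor (objName : String) (settings : List (String × Bool)) : Prop :=
  (settings.map Prod.fst).Nodup
instance (objName : String) (settings : List (String × Bool)) : Decidable (Pre_handleDecor objName settings) := by unfold Pre_handleDecor; infer_instance
def pvWitness_handleDecor : String × (List (String × Bool)) :=
  ("Ab c", [("uppercaseState", true), ("defaultState", false)])

def Spec_handleDecor (objName : String) (settings : List (String × Bool)) (out : String) : Prop := out = handleDecor_alt objName settings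
instance (objName : String) (settings : List (String × Bool)) (out : String) : Decidable (Spec_handleDecor objName settings out) := by unfold Spec_handleDecor; infer_instance

-- ===== CLAIM (what is proved, stated in full; the proofs are below) =====
def Claim_equal_handleDecor : Prop := ∀ (objName : String) (settings : List (String × Bool)), Dom_handleDecor objName settings → Pre_handleDecor objName settings → Spec_handleDecor objName settings (handleDecor objName settings)

-- ===== LEMMAS AND PROOFS =====

-- the fold never rises above its accumulator
lemma foldB_le_init (settings : List (String × Bool)) (b : Nat) :
    settings.foldl stepB b ≤ b := by
  induction settings generalizing b with
  | nil => simp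
  | cons kv rest ih =>
      simp only [List.foldl_cons]
      refine le_trans (ih _) ?_
      unfold stepB; split_ifs with h
      · exact le_of_lt h.2
      · exact le_rfl

-- any enabled entry bounds the fold by its priority
lemma foldB_le_of_mem (settings : List (String × Bool)) (b : Nat) (k : String)
    (h : (k, true) ∈ settings) : settings.foldl stepB b ≤ prioB k := by
  induction settings generalizing b with
  | nil => simp at h
  | cons kv rest ih =>
      obtain ⟨k0, v0⟩ := kv
      rcases List.mem_cons.mp h with h0 | h0
      · obtain ⟨rfl, rfl⟩ := Prod.mk.injEq .. ▸ h0.symm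
        simp only [List.foldl_cons]
        refine le_trans (foldB_le_init _ _) ?_
        unfold stepB; split_ifs with h1
        · exact le_rfl
        · exact Nat.le_of_not_lt (by simpa using h1)
      · exact ih _ h0

-- the fold is the accumulator or the priority of some enabled entry
lemma foldB_cases (settings : List (String × Bool)) (b : Nat) :
    settings.foldl stepB b = b ∨
      ∃ k, (k, true) ∈ settings ∧ settings.foldl stepB b = prioB k := by
  induction settings generalizing b with
  | nil => exact Or.inl rfl
  | cons kv rest ih =>
      obtain ⟨k0, v0⟩ := kv
      simp only [List.foldl_cons]
      rcases ih (stepB b (k0, v0)) with h | ⟨k, hk, hv⟩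
      · rw [h]; unfold stepB; split_ifs with h1
        · obtain ⟨hv0, -⟩ := h1
          subst hv0
          exact Or.inr ⟨k0, List.mem_cons_self, rfl⟩
        · exact Or.inl rfl
      · exact Or.inr ⟨k, List.mem_cons_of_mem _ hk, hv⟩

-- with distinct keys, settings.get(k) is truthy exactly when (k, true) is an entry
lemma get_iff_mem (settings : List (String × Bool)) (k : String)
    (hnd : (settings.map Prod.fst).Nodup) :
    pyGetBool settings k = true ↔ (k, true) ∈ settings := by
  induction settings with
  | nil => simp [pyGetBool]
  | cons kv rest ih =>
      obtain ⟨k0, v0⟩ := kv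
      simp only [List.map_cons, List.nodup_cons] at hnd
      by_cases hk : k0 = k
      · subst hk
        have hfind : pyGetBool ((k0, v0) :: rest) k0 = v0 := by
          simp [pyGetBool]
        rw [hfind]
        constructor
        · rintro rfl; exact List.mem_cons_self
        · intro hm
          rcases List.mem_cons.mp hm with h0 | h0
          · exact (Prod.mk.injEq .. ▸ h0.symm).2
          · exact absurd (List.mem_map_of_mem (f := Prod.fst) h0) (by simpa using hnd.1)
      · have hstep : pyGetBool ((k0, v0) :: rest) k = pyGetBool rest k := by
          simp [pyGetBool, List.find?_cons_of_neg, hk]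
        rw [hstep, ih hnd.2]
        constructor
        · exact fun h => List.mem_cons_of_mem _ h
        · intro hm
          rcases List.mem_cons.mp hm with h0 | h0
          · exact absurd (congrArg Prod.fst h0).symm hk
          · exact h0

lemma prioB_eq_zero {k : String} (h : prioB k = 0) : k = "defaultState" := by
  unfold prioB at h
  split_ifs at h <;> omega

lemma prioB_eq_one {k : String} (h : prioB k = 1) : k = "uppercaseState" := by
  unfold prioB at h
  split_ifs at h <;> omega

lemma prioB_eq_two {k : String} (h : prioB k = 2) : k = "lowercaseState" := by
  unfold prioB at h
  split_ifs at h <;> omega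

lemma prioB_eq_three {k : String} (h : prioB k = 3) : k = "capitalizeState" := by
  unfold prioB at h
  split_ifs at h <;> omega

lemma prioB_le (k : String) : prioB k ≤ 4 := by
  unfold prioB; split_ifs <;> omega

-- the fold computes exactly the index A's first-match scan selects
lemma best_eq (settings : List (String × Bool))
    (hnd : (settings.map Prod.fst).Nodup) :
    settings.foldl stepB 4 =
      (if pyGetBool settings "defaultState" then 0
       else if pyGetBool settings "uppercaseState" then 1
       else if pyGetBool settings "lowercaseState" then 2
       else if pyGetBool settings "capitalizeState" then 3
       else 4) := by
  have giff := fun k => get_iff_mem settings k hnd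
  have p0 : prioB "defaultState" = 0 := by decide
  have p1 : prioB "uppercaseState" = 1 := by decide
  have p2 : prioB "lowercaseState" = 2 := by decide
  have p3 : prioB "capitalizeState" = 3 := by decide
  split_ifs with h1 h2 h3 h4
  -- in each branch: an upper bound from the enabled flag, and the smaller indices ruled
  -- out because the fold value is always the priority of some enabled entry
  · have hub := foldB_le_of_mem settings 4 _ ((giff _).mp h1)
    rw [p0] at hub; omega
  · have hub := foldB_le_of_mem settings 4 _ ((giff _).mp h2)
    rw [p1] at hub
    rcases foldB_cases settings 4 with hc | ⟨k, hk, hv⟩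
    · omega
    · by_cases hz : prioB k = 0
      · exact absurd ((giff _).mpr (prioB_eq_zero hz ▸ hk)) h1
      · omega
  · have hub := foldB_le_of_mem settings 4 _ ((giff _).mp h3)
    rw [p2] at hub
    rcases foldB_cases settings 4 with hc | ⟨k, hk, hv⟩
    · omega
    · by_cases hz : prioB k = 0
      · exact absurd ((giff _).mpr (prioB_eq_zero hz ▸ hk)) h1
      by_cases ho : prioB k = 1
      · exact absurd ((giff _).mpr (prioB_eq_one ho ▸ hk)) h2
      · omega
  · have hub := foldB_le_of_mem settings 4 _ ((giff _).mp h4)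
    rw [p3] at hub
    rcases foldB_cases settings 4 with hc | ⟨k, hk, hv⟩
    · omega
    · by_cases hz : prioB k = 0
      · exact absurd ((giff _).mpr (prioB_eq_zero hz ▸ hk)) h1
      by_cases ho : prioB k = 1
      · exact absurd ((giff _).mpr (prioB_eq_one ho ▸ hk)) h2
      by_cases ht : prioB k = 2
      · exact absurd ((giff _).mpr (prioB_eq_two ht ▸ hk)) h3
      · omega
  · rcases foldB_cases settings 4 with hc | ⟨k, hk, hv⟩
    · exact hc
    · have hub := prioB_le k
      by_cases hz : prioB k = 0
      · exact absurd ((giff _).mpr (prioB_eq_zero hz ▸ hk)) h1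
      by_cases ho : prioB k = 1
      · exact absurd ((giff _).mpr (prioB_eq_one ho ▸ hk)) h2
      by_cases ht : prioB k = 2
      · exact absurd ((giff _).mpr (prioB_eq_two ht ▸ hk)) h3
      by_cases hf : prioB k = 3
      · exact absurd ((giff _).mpr (prioB_eq_three hf ▸ hk)) h4
      · omega

-- ===== VERDICT (by name: the statement is the Claim_ definition above) =====
theorem handleDecor_spec : Claim_equal_handleDecor := by
  intro objName settings _ hnd
  show handleDecor objName settings = handleDecor_alt objName settings
  unfold handleDecor_alt
  rw [best_eq settings hnd]
  by_cases h1 : pyGetBool settings "defaultState" <;>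
    by_cases h2 : pyGetBool settings "uppercaseState" <;>
      by_cases h3 : pyGetBool settings "lowercaseState" <;>
        by_cases h4 : pyGetBool settings "capitalizeState" <;>
          simp [handleDecor, handleDecorLoop, h1, h2, h3, h4]
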